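-- pv_equiv track=rewrite | github.com/mpmoine/CMIP7_DReq_Software | sandbox/MS/dreq_api/consolidate_export.py | _map_record_id
-- ===== SOURCE A (Python) =====
-- def _map_record_id(record, records, keys):
--     """
--     Identifies a record_id in list of records using key
--     """
--     matches = []
--     for key in keys:
--         if key in record:
--             recval = record[key]
--             matches = [r for r, v in records.items() if key in v and v[key] == recval]
--             if len(matches) == 1:
--                 break
--     if len(matches) == 1:
--         return matches[0]
--     else:
--         raise KeyError(f"None or multiple matches when consolidating '{record}'.")
-- ===== SOURCE B (Python) =====
-- def _map_record_id(record, records, keys):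
--     """
--     Identifies a record_id in list of records using key
--     """
--     index = {}
--     for r, v in records.items():
--         for key, val in v.items():
--             index.setdefault(key, {}).setdefault(val, []).append(r)
--     matches = []
--     for key in keys:
--         if key in record:
--             matches = index.get(key, {}).get(record[key], [])
--             if len(matches) == 1:
--                 break
--     if len(matches) == 1:
--         return matches[0]
--     raise KeyError(f"None or multiple matches when consolidating '{record}'.")
-- ===== Notes on version B (the rewrite author's own statement) =====
-- stated objective: alternative
-- what changed: B builds a nested index key->value->[record ids] in one pass over records and answers each key query by two dictionary lookups, instead of A's full scan of records for every queried key.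
import Mathlib
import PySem

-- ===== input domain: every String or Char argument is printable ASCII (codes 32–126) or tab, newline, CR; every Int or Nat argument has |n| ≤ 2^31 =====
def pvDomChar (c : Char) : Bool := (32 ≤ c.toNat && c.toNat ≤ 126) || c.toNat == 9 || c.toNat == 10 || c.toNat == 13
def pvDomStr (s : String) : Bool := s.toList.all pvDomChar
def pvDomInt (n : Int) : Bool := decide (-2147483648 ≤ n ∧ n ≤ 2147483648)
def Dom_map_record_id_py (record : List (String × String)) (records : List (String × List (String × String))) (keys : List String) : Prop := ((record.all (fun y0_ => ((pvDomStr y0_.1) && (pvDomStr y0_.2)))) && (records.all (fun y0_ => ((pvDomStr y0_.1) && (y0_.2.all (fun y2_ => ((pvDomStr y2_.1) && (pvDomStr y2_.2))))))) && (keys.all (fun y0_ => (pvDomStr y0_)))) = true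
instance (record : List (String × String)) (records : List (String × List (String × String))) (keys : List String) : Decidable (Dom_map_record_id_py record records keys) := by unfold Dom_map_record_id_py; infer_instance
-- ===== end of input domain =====

-- B replaces A's per-key full scan of records with a prebuilt nested index (key -> value -> ids); same results, different data structure.


-- ===== PORT A =====
-- [r for r, v in records.items() if key in v and v[key] == recval]
def pvAMatches (records : List (String × List (String × String))) (key recval : String) : List String :=
  (records.filter (fun p => (PySem.Dict.mk p.2).get? key == some recval)).map (fun p => p.1)

-- 'for key in keys: …' with the running 'matches' and the break on len == 1
def pvALoop (record : PySem.Dict String String) (records : List (String × List (String × String))) (keys : List String) (ms : List String) : List String :=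
  match keys with
  | [] => ms
  | key :: rest =>
    if record.contains key then
      let m := pvAMatches records key (record.getD key "")
      if m.length == 1 then m else pvALoop record records rest m
    else pvALoop record records rest ms

def map_record_id_py (record : List (String × String)) (records : List (String × List (String × String))) (keys : List String) : String :=
  let ms := pvALoop (PySem.Dict.mk record) records keys []
  if ms.length == 1 then ms.getD 0 ""
  else ""  -- Python raises KeyError here; excluded by Pre_

-- ===== PORT B =====
-- index.setdefault(key, {}).setdefault(val, []).append(r) over v.items()
def pvIndexOne (idx : PySem.Dict String (PySem.Dict String (List String))) (r : String) (v : List (String × String)) : PySem.Dict String (PySem.Dict String (List String)) :=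
  v.foldl (fun idx kv => idx.modify kv.1 PySem.Dict.empty (fun d => d.modify kv.2 [] (fun l => l ++ [r]))) idx

-- one pass over records.items()
def pvIndex (records : List (String × List (String × String))) : PySem.Dict String (PySem.Dict String (List String)) :=
  records.foldl (fun idx p => pvIndexOne idx p.1 p.2) PySem.Dict.empty

-- 'for key in keys: …' querying the index, same break
def pvBLoop (record : PySem.Dict String String) (index : PySem.Dict String (PySem.Dict String (List String))) (keys : List String) (ms : List String) : List String :=
  match keys with
  | [] => ms
  | key :: rest =>
    if record.contains key then
      let m := (index.getD key PySem.Dict.empty).getD (record.getD key "") []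
      if m.length == 1 then m else pvBLoop record index rest m
    else pvBLoop record index rest ms

def map_record_id_py_alt (record : List (String × String)) (records : List (String × List (String × String))) (keys : List String) : String :=
  let index := pvIndex records
  let ms := pvBLoop (PySem.Dict.mk record) index keys []
  if ms.length == 1 then ms.getD 0 ""
  else ""  -- Python raises KeyError here; excluded by Pre_

-- ===== PRECONDITION & SPEC =====
-- Pre_ excludes the inputs where the Python raises KeyError (no key in `keys` yields exactly one matching record),
-- and requires every association list to have distinct keys, since each represents a Python dict.
def Pre_map_record_id_py (record : List (String × String)) (records : List (String × List (String × String))) (keys : List String) : Prop :=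
  (record.map Prod.fst).Nodup ∧ (records.map Prod.fst).Nodup ∧ (∀ p ∈ records, (p.2.map Prod.fst).Nodup) ∧
  ∃ key ∈ keys, (PySem.Dict.mk record).contains key = true ∧
    (records.filter (fun p => (PySem.Dict.mk p.2).get? key == (PySem.Dict.mk record).get? key)).length = 1
instance (record : List (String × String)) (records : List (String × List (String × String))) (keys : List String) : Decidable (Pre_map_record_id_py record records keys) := by unfold Pre_map_record_id_py; infer_instance

def pvWitness_map_record_id_py : (List (String × String)) × (List (String × List (String × String))) × List String :=
  ([("a", "1")], [("r1", [("a", "1")]), ("r2", [("a", "2")])], ["a"])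

def Spec_map_record_id_py (record : List (String × String)) (records : List (String × List (String × String))) (keys : List String) (out : String) : Prop := out = map_record_id_py_alt record records keys
instance (record : List (String × String)) (records : List (String × List (String × String))) (keys : List String) (out : String) : Decidable (Spec_map_record_id_py record records keys out) := by unfold Spec_map_record_id_py; infer_instance

-- ===== CLAIM (what is proved, stated in full; the proofs are below) =====
def Claim_equal_map_record_id_py : Prop := ∀ (record : List (String × String)) (records : List (String × List (String × String))) (keys : List String), Dom_map_record_id_py record records keys → Pre_map_record_id_py record records keys → Spec_map_record_id_py record records keys (map_record_id_py record records keys)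

-- ===== LEMMAS AND PROOFS =====

-- each occurrence of (key, val) in v appends r once to index[key][val]
lemma pvIndexOne_getD (v : List (String × String)) (idx : PySem.Dict String (PySem.Dict String (List String))) (r key val : String) :
    ((pvIndexOne idx r v).getD key PySem.Dict.empty).getD val []
    = (idx.getD key PySem.Dict.empty).getD val [] ++ List.replicate (v.count (key, val)) r := by
  induction v generalizing idx with
  | nil => simp [pvIndexOne]
  | cons kv rest ih =>
    rcases kv with ⟨k1, k2⟩
    have hstep : pvIndexOne idx r ((k1, k2) :: rest)
        = pvIndexOne (idx.modify k1 PySem.Dict.empty (fun d => d.modify k2 [] (fun l => l ++ [r]))) r rest := by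
      simp [pvIndexOne]
    rw [hstep, ih, PySem.Dict.getD_modify]
    by_cases h1 : key = k1
    · rw [if_pos h1, PySem.Dict.getD_modify]
      by_cases h2 : val = k2
      · rw [if_pos h2]
        subst h1; subst h2
        have hcnt : ((key, val) :: rest).count (key, val) = rest.count (key, val) + 1 := by
          simp
        rw [hcnt]
        have hrep : List.replicate (List.count (key, val) rest + 1) r
            = List.replicate (List.count (key, val) rest) r ++ [r] := List.replicate_succ'
        rw [hrep, List.append_assoc]
        congr 1
      · rw [if_neg h2]
        have hne : ((k1, k2) : String × String) ≠ (key, val) := by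
          intro h; exact h2 (congrArg Prod.snd h).symm
        have hcnt : ((k1, k2) :: rest).count (key, val) = rest.count (key, val) := by
          simp [hne]
        rw [hcnt, h1]
    · rw [if_neg h1]
      have hne : ((k1, k2) : String × String) ≠ (key, val) := by
        intro h; exact h1 (congrArg Prod.fst h).symm
      have hcnt : ((k1, k2) :: rest).count (key, val) = rest.count (key, val) := by
        simp [hne]
      rw [hcnt]

-- with distinct keys, a pair occurs iff the dict lookup returns its value
lemma pvCount_of_nodup (v : List (String × String)) (key val : String) (hnd : (v.map Prod.fst).Nodup) :
    v.count (key, val) = if (PySem.Dict.mk v).get? key == some val then 1 else 0 := by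
  induction v with
  | nil => simp [PySem.Dict.get?]
  | cons kv rest ih =>
    rcases kv with ⟨k, x⟩
    simp only [List.map_cons, List.nodup_cons] at hnd
    rw [PySem.Dict.get?_mk_cons]
    by_cases hk : k = key
    · subst hk
      have hzero : rest.count (k, val) = 0 := by
        rw [List.count_eq_zero]
        intro hmem
        exact hnd.1 (List.mem_map.mpr ⟨(k, val), hmem, rfl⟩)
      by_cases hx : x = val
      · subst hx; simp [hzero]
      · have hne : ((k, x) : String × String) ≠ (k, val) := by
          intro h; exact hx (congrArg Prod.snd h)
        simp [hzero, hx, hne]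
    · have hbk : (k == key) = false := by simp [hk]
      rw [hbk]
      simp only [Bool.false_eq_true, if_false]
      rw [← ih hnd.2]
      have hne : ((k, x) : String × String) ≠ (key, val) := by
        intro h; exact hk (congrArg Prod.fst h)
      simp [hne]

-- the index answers exactly A's scan of records
lemma pvIndex_loop (records : List (String × List (String × String))) (idx : PySem.Dict String (PySem.Dict String (List String))) (key val : String)
    (hnd : ∀ p ∈ records, (p.2.map Prod.fst).Nodup) :
    ((records.foldl (fun idx p => pvIndexOne idx p.1 p.2) idx).getD key PySem.Dict.empty).getD val []
    = (idx.getD key PySem.Dict.empty).getD val []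
      ++ (records.filter (fun p => (PySem.Dict.mk p.2).get? key == some val)).map (fun p => p.1) := by
  induction records generalizing idx with
  | nil => simp
  | cons p rest ih =>
    simp only [List.foldl_cons]
    rw [ih _ (fun q hq => hnd q (List.mem_cons_of_mem _ hq))]
    rw [pvIndexOne_getD, pvCount_of_nodup _ _ _ (hnd p (List.mem_cons_self))]
    by_cases hc : (PySem.Dict.mk p.2).get? key == some val
    · simp [hc]
    · simp [hc]

lemma pvIndex_getD (records : List (String × List (String × String))) (key val : String)
    (hnd : ∀ p ∈ records, (p.2.map Prod.fst).Nodup) :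
    ((pvIndex records).getD key PySem.Dict.empty).getD val [] = pvAMatches records key val := by
  rw [pvIndex, pvIndex_loop records PySem.Dict.empty key val hnd, pvAMatches]
  simp [PySem.Dict.getD_empty]

lemma pvLoop_eq (record : PySem.Dict String String) (records : List (String × List (String × String))) (keys : List String) (ms : List String)
    (hnd : ∀ p ∈ records, (p.2.map Prod.fst).Nodup) :
    pvBLoop record (pvIndex records) keys ms = pvALoop record records keys ms := by
  induction keys generalizing ms with
  | nil => rfl
  | cons key rest ih =>
    simp only [pvBLoop, pvALoop]
    rw [pvIndex_getD records key (record.getD key "") hnd]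
    by_cases hc : record.contains key
    · simp only [hc, if_pos]
      by_cases hl : (pvAMatches records key (record.getD key "")).length == 1
      · simp [hl]
      · simp [hl, ih]
    · simp [hc, ih]

-- ===== VERDICT (by name: the statement is the Claim_ definition above) =====
theorem map_record_id_py_spec : Claim_equal_map_record_id_py := by
  intro record records keys _ hpre
  simp only [Spec_map_record_id_py, map_record_id_py, map_record_id_py_alt,
    pvLoop_eq _ _ _ _ hpre.2.2.1]
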